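-- pv_equiv track=rewrite | github.com/xpessoles/Informatique | Exercices/S2_06_Graphes/14_applications_dico/14_applications_dico.py | degre_max_d
-- ===== SOURCE A (Python) =====
-- def degre_max_d(G:{}) -> [int] :
--     maxi = -1
--     for k in G :
--         if len(G[k]) > maxi :
--             maxi = len(G[k])
--     l = []
--     for k in G :
--         if len(G[k]) == maxi :
--             l.append(k)
--     return l
-- ===== SOURCE B (Python) =====
-- def degre_max_d(G: {}) -> [int]:
--     maxi = -1
--     l = []
--     for k in G:
--         d = len(G[k])
--         if d > maxi:
--             maxi = d
--             l = [k]
--         elif d == maxi: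
--             l.append(k)
--     return l
-- ===== Notes on version B (the rewrite author's own statement) =====
-- stated objective: simpler
-- what changed: Fuses A's two passes (one to find the maximum degree, one to collect vertices of that degree) into a single pass that maintains the running maximum and resets/extends the result list as it goes.
import Mathlib
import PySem

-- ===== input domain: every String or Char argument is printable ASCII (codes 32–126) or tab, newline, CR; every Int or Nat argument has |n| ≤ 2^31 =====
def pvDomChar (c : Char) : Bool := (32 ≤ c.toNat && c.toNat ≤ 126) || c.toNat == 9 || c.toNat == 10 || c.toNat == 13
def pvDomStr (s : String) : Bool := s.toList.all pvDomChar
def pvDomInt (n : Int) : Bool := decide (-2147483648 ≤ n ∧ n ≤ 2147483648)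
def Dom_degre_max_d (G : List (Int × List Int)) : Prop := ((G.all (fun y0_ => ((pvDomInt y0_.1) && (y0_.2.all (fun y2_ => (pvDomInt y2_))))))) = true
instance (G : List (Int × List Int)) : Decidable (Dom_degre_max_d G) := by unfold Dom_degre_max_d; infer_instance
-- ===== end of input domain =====

-- B fuses A's two passes (find max degree; collect vertices of that degree) into one pass.

-- ===== PORT A =====
-- G[k]: first-match lookup in the association list (exact for keys that occur, which
-- is the only way A uses it since k is drawn from G itself)
def pvLookup (G : List (Int × List Int)) (k : Int) : List Int :=
  match G with
  | [] => []
  | (a, v) :: rest => if a = k then v else pvLookup rest k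

def degre_max_d (G : List (Int × List Int)) : List Int :=
  -- first pass: maxi = -1; for k in G: if len(G[k]) > maxi: maxi = len(G[k])
  let maxi : Int := G.foldl
    (fun m kv => if ((pvLookup G kv.1).length : Int) > m then ((pvLookup G kv.1).length : Int) else m) (-1)
  -- second pass: l = []; for k in G: if len(G[k]) == maxi: l.append(k)
  G.foldl (fun l kv => if ((pvLookup G kv.1).length : Int) = maxi then l ++ [kv.1] else l) []

-- ===== PORT B =====
def pvLoopB : List (Int × List Int) → Int → List Int → Int × List Int
  | [], maxi, l => (maxi, l)
  | (k, v) :: rest, maxi, l =>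
    let d : Int := v.length
    if d > maxi then pvLoopB rest d [k]
    else if d = maxi then pvLoopB rest maxi (l ++ [k])
    else pvLoopB rest maxi l

def degre_max_d_alt (G : List (Int × List Int)) : List Int :=
  (pvLoopB G (-1) []).2

-- ===== PRECONDITION & SPEC =====
-- Pre_ states the dict-representation invariant only: the association list stands for a
-- Python dict, whose keys are distinct; it excludes no input that arises from a dict.
def Pre_degre_max_d (G : List (Int × List Int)) : Prop := (G.map (·.1)).Nodup
instance (G : List (Int × List Int)) : Decidable (Pre_degre_max_d G) := by unfold Pre_degre_max_d; infer_instance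

def pvWitness_degre_max_d : (List (Int × List Int)) := [(1, [2, 3]), (2, [1]), (3, [1, 2])]

def Spec_degre_max_d (G : List (Int × List Int)) (out : List Int) : Prop := out = degre_max_d_alt G
instance (G : List (Int × List Int)) (out : List Int) : Decidable (Spec_degre_max_d G out) := by unfold Spec_degre_max_d; infer_instance

-- ===== CLAIM (what is proved, stated in full; the proofs are below) =====
def Claim_equal_degre_max_d : Prop := ∀ (G : List (Int × List Int)), Dom_degre_max_d G → Pre_degre_max_d G → Spec_degre_max_d G (degre_max_d G)

-- ===== LEMMAS AND PROOFS =====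

-- running maximum over the degrees, as a fold
def pvFmax (G : List (Int × List Int)) (m : Int) : Int :=
  G.foldl (fun a kv => max a (kv.2.length : Int)) m

theorem pvFmax_cons (k : Int) (v : List Int) (G : List (Int × List Int)) (m : Int) :
    pvFmax ((k, v) :: G) m = pvFmax G (max m (v.length : Int)) := rfl

theorem le_pvFmax (G : List (Int × List Int)) (m : Int) : m ≤ pvFmax G m := by
  induction G generalizing m with
  | nil => simp [pvFmax]
  | cons kv rest ih =>
    calc m ≤ max m (kv.2.length : Int) := le_max_left _ _
    _ ≤ pvFmax rest (max m (kv.2.length : Int)) := ih _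
    _ = pvFmax (kv :: rest) m := by cases kv; rfl

-- characterisation of B's fused loop
theorem pvLoopB_eq (G : List (Int × List Int)) (m : Int) (acc : List Int) :
    pvLoopB G m acc =
      (pvFmax G m,
       (if pvFmax G m = m then acc else []) ++
         (G.filter (fun kv => (kv.2.length : Int) = pvFmax G m)).map (·.1)) := by
  induction G generalizing m acc with
  | nil => simp [pvLoopB, pvFmax]
  | cons kv rest ih =>
    obtain ⟨k, v⟩ := kv
    by_cases h1 : ((v.length : Int) > m)
    · have hmax : max m (v.length : Int) = (v.length : Int) := max_eq_right (le_of_lt h1)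
      have hF : pvFmax ((k, v) :: rest) m = pvFmax rest (v.length : Int) := by
        rw [pvFmax_cons, hmax]
      have hle : (v.length : Int) ≤ pvFmax rest (v.length : Int) := le_pvFmax _ _
      have hne : pvFmax rest (v.length : Int) ≠ m := by omega
      have hstep : pvLoopB ((k, v) :: rest) m acc = pvLoopB rest (v.length : Int) [k] := by
        simp [pvLoopB, h1]
      rw [hstep, ih, hF, if_neg hne]
      by_cases h2 : ((v.length : Int) = pvFmax rest (v.length : Int))
      · rw [if_pos h2.symm]
        simp only [List.filter_cons, decide_eq_true h2, if_true, List.map_cons,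
          List.singleton_append, List.nil_append]
      · rw [if_neg (fun h => h2 h.symm)]; simp [h2]
    · have hmax : max m (v.length : Int) = m := max_eq_left (by omega)
      have hF : pvFmax ((k, v) :: rest) m = pvFmax rest m := by
        rw [pvFmax_cons, hmax]
      by_cases h2 : ((v.length : Int) = m)
      · have hstep : pvLoopB ((k, v) :: rest) m acc = pvLoopB rest m (acc ++ [k]) := by
          simp [pvLoopB, h2]
        rw [hstep, ih, hF]
        by_cases h3 : pvFmax rest m = m
        · rw [if_pos h3, if_pos h3]
          have h4 : ((v.length : Int) = pvFmax rest m) := by omega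
          simp [h4]
        · rw [if_neg h3, if_neg h3]
          have h4 : ¬ ((v.length : Int) = pvFmax rest m) := by
            intro he; exact h3 (by omega)
          simp [h4]
      · have hstep : pvLoopB ((k, v) :: rest) m acc = pvLoopB rest m acc := by
          have h1' : ¬ (m < (v.length : Int)) := h1
          simp [pvLoopB, h1', h2]
        have hge : m ≤ pvFmax rest m := le_pvFmax _ _
        have h4 : ¬ ((v.length : Int) = pvFmax rest m) := by omega
        rw [hstep, ih, hF]
        simp [h4]

-- on a list with distinct keys, first-match lookup of a present key gives its own value
theorem pvLookup_self (G : List (Int × List Int)) :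
    (G.map (·.1)).Nodup → ∀ kv ∈ G, pvLookup G kv.1 = kv.2 := by
  induction G with
  | nil => intro _ kv hkv; cases hkv
  | cons p rest ih =>
    intro h kv hkv
    obtain ⟨a, v⟩ := p
    simp only [List.map_cons, List.nodup_cons] at h
    rcases List.mem_cons.mp hkv with hkv | hkv
    · subst hkv; simp [pvLookup]
    · have hne : a ≠ kv.1 := by
        intro he
        exact h.1 (he ▸ (List.mem_map.mpr ⟨kv, hkv, rfl⟩))
      simp only [pvLookup, if_neg hne]
      exact ih h.2 kv hkv

-- A in its canonical form: filter the keys whose degree equals the maximum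
theorem degre_max_d_eq (G : List (Int × List Int)) (h : (G.map (·.1)).Nodup) :
    degre_max_d G =
      (G.filter (fun kv => (kv.2.length : Int) = pvFmax G (-1))).map (·.1) := by
  unfold degre_max_d
  have h1 : G.foldl
      (fun m kv => if ((pvLookup G kv.1).length : Int) > m then ((pvLookup G kv.1).length : Int) else m) (-1)
      = pvFmax G (-1) := by
    unfold pvFmax
    refine PySem.List.foldl_congr_mem G _ _ (-1) (fun m kv hkv => ?_)
    rw [pvLookup_self G h kv hkv]
    split_ifs with hc <;> omega
  rw [h1]
  have h2 : G.foldl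
      (fun l kv => if ((pvLookup G kv.1).length : Int) = pvFmax G (-1) then l ++ [kv.1] else l) []
      = G.foldl (fun l kv => if ((kv.2.length : Int) = pvFmax G (-1)) then l ++ [kv.1] else l) [] := by
    refine PySem.List.foldl_congr_mem G _ _ [] (fun l kv hkv => ?_)
    rw [pvLookup_self G h kv hkv]
  rw [h2]
  simpa using PySem.List.foldl_append_ite
    (p := fun kv => ((kv.2.length : Int) = pvFmax G (-1))) (f := (·.1)) (l := G) (acc := [])

-- ===== VERDICT (by name: the statement is the Claim_ definition above) =====
theorem degre_max_d_spec : Claim_equal_degre_max_d := by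
  intro G _hdom hpre
  unfold Spec_degre_max_d degre_max_d_alt
  rw [pvLoopB_eq, degre_max_d_eq G hpre]
  by_cases h : pvFmax G (-1) = -1 <;> simp [h]
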